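-- pv_equiv track=rewrite | github.com/wei09128/PRC2-H3K27-GPCR-Cancer-Axis | code/print_gesa.py | get_cell_type_from_name
-- ===== SOURCE A (Python) =====
-- def get_cell_type_from_name(fname: str) -> str:
--     ct = fname
--     for suf in [
--         "_GSEA_Prerank_Results.csv",
--         "_GSEA_Results.csv",
--         "_GSEA_Prerank.csv",
--         "_GSEA.csv",
--         ".csv",
--     ]:
--         if ct.endswith(suf):
--             ct = ct[: -len(suf)]
--             break
--     return ct
-- ===== SOURCE B (Python) =====
-- def get_cell_type_from_name(fname: str) -> str:
--     # Strip the ".csv" extension once, then strip at most one known GSEA tag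
--     # from the stem via an early-return chain (no loop, no repeated ".csv" text).
--     if not fname.endswith(".csv"):
--         return fname
--     stem = fname[:-4]
--     if stem.endswith("_GSEA_Prerank_Results"):
--         return stem[:-21]
--     if stem.endswith("_GSEA_Results"):
--         return stem[:-13]
--     if stem.endswith("_GSEA_Prerank"):
--         return stem[:-13]
--     if stem.endswith("_GSEA"):
--         return stem[:-5]
--     return stem
-- ===== Notes on version B (the rewrite author's own statement) =====
-- stated objective: simpler
-- what changed: B first strips the .csv extension once and then matches the short GSEA tags on the stem in an early-return chain, instead of A's loop-with-break over five full suffixes each repeating .csv.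
import Mathlib
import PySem

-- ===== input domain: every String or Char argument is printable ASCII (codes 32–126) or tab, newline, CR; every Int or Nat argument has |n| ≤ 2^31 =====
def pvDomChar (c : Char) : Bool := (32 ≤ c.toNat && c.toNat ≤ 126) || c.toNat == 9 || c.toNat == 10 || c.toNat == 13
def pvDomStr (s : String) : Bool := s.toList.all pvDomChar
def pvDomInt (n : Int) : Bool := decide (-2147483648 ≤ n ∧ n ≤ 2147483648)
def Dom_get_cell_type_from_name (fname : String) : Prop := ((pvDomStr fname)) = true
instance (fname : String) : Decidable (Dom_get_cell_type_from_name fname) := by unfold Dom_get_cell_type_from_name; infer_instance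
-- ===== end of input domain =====

-- B strips ".csv" once and then matches the short GSEA tags on the stem in an
-- early-return chain, instead of A's loop-with-break over five full suffixes (objective: simpler).

-- ===== PORT A =====
-- the suffix list A iterates over, in A's order
def pvSuffixes : List String :=
  ["_GSEA_Prerank_Results.csv", "_GSEA_Results.csv", "_GSEA_Prerank.csv", "_GSEA.csv", ".csv"]

-- A's for-loop with break: the first matching suffix is stripped, then the loop stops
def pvStripLoop (ct : String) : List String → String
  | [] => ct
  | suf :: rest =>
      if PySem.Str.endswith ct suf then
        PySem.Str.slice ct none (some (-(PySem.Str.len suf : Int)))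
      else pvStripLoop ct rest

def get_cell_type_from_name (fname : String) : String :=
  pvStripLoop fname pvSuffixes

-- ===== PORT B =====
-- B's tag chain on the ".csv"-stripped stem (the early-return chain of Source B)
def pvStripTag (stem : String) : String :=
  if PySem.Str.endswith stem "_GSEA_Prerank_Results" then PySem.Str.slice stem none (some (-21))
  else if PySem.Str.endswith stem "_GSEA_Results" then PySem.Str.slice stem none (some (-13))
  else if PySem.Str.endswith stem "_GSEA_Prerank" then PySem.Str.slice stem none (some (-13))
  else if PySem.Str.endswith stem "_GSEA" then PySem.Str.slice stem none (some (-5))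
  else stem

def get_cell_type_from_name_alt (fname : String) : String :=
  if PySem.Str.endswith fname ".csv" then
    pvStripTag (PySem.Str.slice fname none (some (-4)))
  else fname

-- ===== PRECONDITION & SPEC =====
def Spec_get_cell_type_from_name (fname : String) (out : String) : Prop := out = get_cell_type_from_name_alt fname
instance (fname : String) (out : String) : Decidable (Spec_get_cell_type_from_name fname out) := by unfold Spec_get_cell_type_from_name; infer_instance

-- ===== CLAIM (what is proved, stated in full; the proofs are below) =====
def Claim_equal_get_cell_type_from_name : Prop := ∀ (fname : String), Dom_get_cell_type_from_name fname → Spec_get_cell_type_from_name fname (get_cell_type_from_name fname)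

-- ===== LEMMAS AND PROOFS =====

-- ending with t ++ c is, once c is known to be a suffix, ending of the c-stripped part with t
theorem pv_suffix_append {t c s : List Char} (hc : c <:+ s) :
    (t ++ c <:+ s) ↔ t <:+ s.take (s.length - c.length) := by
  obtain ⟨u, rfl⟩ := hc
  have hu : (u ++ c).take ((u ++ c).length - c.length) = u := by
    simp [List.length_append, List.take_left']
  rw [hu]
  constructor
  · rintro ⟨v, hv⟩
    refine ⟨v, ?_⟩
    have hv' : (v ++ t) ++ c = u ++ c := by simpa [List.append_assoc] using hv
    exact List.append_cancel_right hv'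
  · rintro ⟨v, rfl⟩
    exact ⟨v, by simp [List.append_assoc]⟩

-- specialisation to ".csv", phrased so that it rewrites the literal suffixes directly
theorem pv_suffix_csv {t full s : List Char} (hc : ".csv".toList <:+ s)
    (hfull : full = t ++ ".csv".toList) :
    (full <:+ s) ↔ t <:+ s.take (s.length - 4) := by
  subst hfull
  simpa using pv_suffix_append hc

theorem pv_not_suffix {t c s : List Char} (hc : ¬ c <:+ s) : ¬ (t ++ c <:+ s) :=
  fun h => hc ((List.suffix_append t c).trans h)

-- A's loop, written out as the five-way conditional on the character list
set_option maxHeartbeats 2000000 in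
theorem pv_lemA (fname : String) : (pvStripLoop fname pvSuffixes).toList =
    (if "_GSEA_Prerank_Results.csv".toList <:+ fname.toList then fname.toList.take (fname.length - 25)
     else if "_GSEA_Results.csv".toList <:+ fname.toList then fname.toList.take (fname.length - 17)
     else if "_GSEA_Prerank.csv".toList <:+ fname.toList then fname.toList.take (fname.length - 17)
     else if "_GSEA.csv".toList <:+ fname.toList then fname.toList.take (fname.length - 9)
     else if ".csv".toList <:+ fname.toList then fname.toList.take (fname.length - 4)
     else fname.toList) := by
  simp only [pvSuffixes, pvStripLoop]
  simp [pysem, apply_ite String.toList]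
  all_goals split_ifs <;> rfl

-- B's tag chain, written out on the character list
set_option maxHeartbeats 2000000 in
theorem pv_lemTag (st : String) : (pvStripTag st).toList =
    (if "_GSEA_Prerank_Results".toList <:+ st.toList then st.toList.take (st.length - 21)
     else if "_GSEA_Results".toList <:+ st.toList then st.toList.take (st.length - 13)
     else if "_GSEA_Prerank".toList <:+ st.toList then st.toList.take (st.length - 13)
     else if "_GSEA".toList <:+ st.toList then st.toList.take (st.length - 5)
     else st.toList) := by
  unfold pvStripTag
  simp [pysem, apply_ite String.toList]
  all_goals split_ifs <;> rfl

set_option maxHeartbeats 2000000 in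
theorem pv_lemB (fname : String) : (get_cell_type_from_name_alt fname).toList =
    (if ".csv".toList <:+ fname.toList then
       (pvStripTag (PySem.Str.slice fname none (some (-4)))).toList
     else fname.toList) := by
  unfold get_cell_type_from_name_alt
  simp [pysem, apply_ite String.toList]

-- ===== VERDICT (by name: the statement is the Claim_ definition above) =====
set_option maxHeartbeats 4000000 in
theorem get_cell_type_from_name_spec : Claim_equal_get_cell_type_from_name := by
  intro fname _
  unfold Spec_get_cell_type_from_name get_cell_type_from_name
  refine String.toList_inj.mp ?_
  rw [pv_lemA, pv_lemB]
  have hst : (PySem.Str.slice fname none (some (-4))).toList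
      = fname.toList.take (fname.length - 4) := by
    simp [pysem]
  have hstL : (PySem.Str.slice fname none (some (-4))).length = fname.length - 4 := by
    rw [← String.length_toList (s := PySem.Str.slice fname none (some (-4))), hst,
        List.length_take, String.length_toList]
    omega
  rw [pv_lemTag, hst, hstL]
  have hn : fname.length = fname.toList.length := String.length_toList.symm
  rw [hn]
  by_cases h4 : ".csv".toList <:+ fname.toList
  · simp only [pv_suffix_csv h4 (t := "_GSEA_Prerank_Results".toList) (full := "_GSEA_Prerank_Results.csv".toList) (by decide),
        pv_suffix_csv h4 (t := "_GSEA_Results".toList) (full := "_GSEA_Results.csv".toList) (by decide),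
        pv_suffix_csv h4 (t := "_GSEA_Prerank".toList) (full := "_GSEA_Prerank.csv".toList) (by decide),
        pv_suffix_csv h4 (t := "_GSEA".toList) (full := "_GSEA.csv".toList) (by decide),
        if_pos h4]
    split_ifs <;> first
      | rfl
      | (rw [List.take_take]; congr 1; omega)
  · have n1 : ¬ ("_GSEA_Prerank_Results.csv".toList <:+ fname.toList) := by
      have e : "_GSEA_Prerank_Results.csv".toList
          = "_GSEA_Prerank_Results".toList ++ ".csv".toList := by decide
      rw [e]; exact pv_not_suffix h4
    have n2 : ¬ ("_GSEA_Results.csv".toList <:+ fname.toList) := by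
      have e : "_GSEA_Results.csv".toList = "_GSEA_Results".toList ++ ".csv".toList := by decide
      rw [e]; exact pv_not_suffix h4
    have n3 : ¬ ("_GSEA_Prerank.csv".toList <:+ fname.toList) := by
      have e : "_GSEA_Prerank.csv".toList = "_GSEA_Prerank".toList ++ ".csv".toList := by decide
      rw [e]; exact pv_not_suffix h4
    have n4 : ¬ ("_GSEA.csv".toList <:+ fname.toList) := by
      have e : "_GSEA.csv".toList = "_GSEA".toList ++ ".csv".toList := by decide
      rw [e]; exact pv_not_suffix h4
    rw [if_neg n1, if_neg n2, if_neg n3, if_neg n4, if_neg h4, if_neg h4]
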